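-- pv_equiv track=rewrite | github.com/Hua-CM/PyCulturome | PyCulturome/downstream/check_sanger.py | format_alignment_custom
-- ===== SOURCE A (Python) =====
-- def format_alignment_custom(seq1id, seq2id, align1, align2, line_length=100):
--     """Custom format function to display the alignment in the desired format with specified line length"""
--     alignment_str = ""
--
--     # Process sequences in chunks of line_length
--     for i in range(0, len(align1), line_length):
--         chunk1 = align1[i:i+line_length]
--         chunk2 = align2[i:i+line_length]
--
--         # Generate first sequence line
--         alignment_str += f"{seq1id:20} {chunk1}\n"
--
--         # Generate match/mismatch line
--         match_line = ''.join(['|' if chunk1[j] == chunk2[j] and chunk1[j] != '-' else ' ' for j in range(len(chunk1))])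
--         alignment_str += f"{'':20} {match_line}\n"
--
--         # Generate second sequence line
--         alignment_str += f"{seq2id:20} {chunk2}\n"
--
--         # Add an extra newline to separate chunks, optional
--         alignment_str += "\n"
--
--     return alignment_str
-- ===== SOURCE B (Python) =====
-- def format_alignment_custom(seq1id, seq2id, align1, align2, line_length=100):
--     """Consume the sequences chunk by chunk with a while loop (no index arithmetic),
--     mark matches by zipping each chunk pair, collect LINES and join them once."""
--     name1, name2, gap = f"{seq1id:20}", f"{seq2id:20}", ' ' * 20
--     lines = []
--     a1, a2 = align1, align2
--     while a1 and line_length > 0: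
--         c1, a1 = a1[:line_length], a1[line_length:]
--         c2, a2 = a2[:line_length], a2[line_length:]
--         marks = ''.join('|' if x == y and x != '-' else ' ' for x, y in zip(c1, c2))
--         lines += [f"{name1} {c1}", f"{gap} {marks}", f"{name2} {c2}", ""]
--     return "\n".join(lines + [""])
-- ===== Notes on version B (the rewrite author's own statement) =====
-- stated objective: alternative
-- what changed: B replaces A's index-driven range loop (per-chunk indexed comprehension, string += accumulation) by a while loop that consumes the two sequences by repeated prefix splitting, marks matches by zipping each chunk pair, and collects individual LINES into a list that is joined by newlines once at the end.
-- outside the precondition, e.g. on format_alignment_custom('a', 'b', 'AC', 'AC', 0): A raises ValueError, B returns ''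
import Mathlib
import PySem

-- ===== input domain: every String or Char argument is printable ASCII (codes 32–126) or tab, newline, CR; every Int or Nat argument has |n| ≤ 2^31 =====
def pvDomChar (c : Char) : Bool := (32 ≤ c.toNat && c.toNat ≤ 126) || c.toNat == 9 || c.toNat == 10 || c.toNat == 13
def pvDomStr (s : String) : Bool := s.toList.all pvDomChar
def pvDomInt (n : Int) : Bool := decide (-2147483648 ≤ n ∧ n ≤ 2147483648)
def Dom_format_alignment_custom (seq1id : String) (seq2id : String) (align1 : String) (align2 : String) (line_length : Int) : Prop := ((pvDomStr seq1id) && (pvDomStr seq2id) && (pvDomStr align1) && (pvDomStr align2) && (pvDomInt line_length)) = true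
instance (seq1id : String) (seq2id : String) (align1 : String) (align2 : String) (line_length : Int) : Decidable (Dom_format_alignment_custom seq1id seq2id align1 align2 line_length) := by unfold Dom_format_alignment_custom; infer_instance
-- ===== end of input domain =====

-- B consumes the sequences chunk by chunk with a while loop (prefix splitting, zip match per
-- chunk) and joins a collected list of lines once, instead of A's index-range loop with an
-- indexed per-chunk comprehension and string concatenation; alternative decomposition, same cost.

-- ===== PORT A =====
-- f"{s:20}": left-justify a string to width 20 with spaces (no truncation); exact for str values.
def pvPad20 (s : List Char) : List Char := s ++ List.replicate (20 - s.length) ' '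

-- A's per-chunk comprehension: ['|' if chunk1[j] == chunk2[j] and chunk1[j] != '-' else ' '
-- for j in range(len(chunk1))].  The pyGetD default ' ' is reached only where Python raises
-- IndexError (chunk2 shorter than chunk1), which Pre_ excludes.
def pvMatchLineA (chunk1 chunk2 : List Char) : List Char :=
  (PySem.List.pyRange 0 (chunk1.length : Int) 1).map (fun j =>
    if PySem.List.pyGetD chunk1 j ' ' == PySem.List.pyGetD chunk2 j ' ' &&
       PySem.List.pyGetD chunk1 j ' ' != '-' then '|' else ' ')

def format_alignment_custom (seq1id : String) (seq2id : String) (align1 : String) (align2 : String) (line_length : Int) : String :=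
  let a1 := align1.toList
  let a2 := align2.toList
  let alignment_str : List Char :=
    (PySem.List.pyRange 0 (a1.length : Int) line_length).foldl (fun acc i =>
      let chunk1 := PySem.List.slice a1 (some i) (some (i + line_length))
      let chunk2 := PySem.List.slice a2 (some i) (some (i + line_length))
      let acc := acc ++ (pvPad20 seq1id.toList ++ ' ' :: chunk1 ++ ['\n'])
      let acc := acc ++ (pvPad20 [] ++ ' ' :: pvMatchLineA chunk1 chunk2 ++ ['\n'])
      let acc := acc ++ (pvPad20 seq2id.toList ++ ' ' :: chunk2 ++ ['\n'])
      acc ++ ['\n']) []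
  String.ofList alignment_str

-- ===== PORT B =====
-- B's per-chunk match marks: one pass over zip(c1, c2).
def pvMatchZip (a1 a2 : List Char) : List Char :=
  (a1.zip a2).map (fun p => if p.1 == p.2 && p.1 != '-' then '|' else ' ')

-- B's while loop: 'while a1 and line_length > 0', splitting off the prefixes a1[:L], a2[:L]
-- and collecting the three formatted lines plus an empty line per chunk.
def pvGoB (name1 name2 : List Char) (L : Int) (a1 a2 : List Char) : List (List Char) :=
  if hc : a1 = [] ∨ L ≤ 0 then []
  else
    (name1 ++ ' ' :: PySem.List.slice a1 none (some L)) ::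
    (List.replicate 20 ' ' ++ ' ' ::
        pvMatchZip (PySem.List.slice a1 none (some L)) (PySem.List.slice a2 none (some L))) ::
    (name2 ++ ' ' :: PySem.List.slice a2 none (some L)) ::
    [] ::
    pvGoB name1 name2 L (PySem.List.slice a1 (some L) none) (PySem.List.slice a2 (some L) none)
termination_by a1.length
decreasing_by
  push_neg at hc
  rw [PySem.List.slice_from _ (by omega : (0:Int) ≤ L)]
  have h1 : a1.length ≠ 0 := fun h => hc.1 (List.eq_nil_of_length_eq_zero h)
  have h2 : 0 < L.toNat := by omega
  simp only [List.length_drop]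
  omega

def format_alignment_custom_alt (seq1id : String) (seq2id : String) (align1 : String) (align2 : String) (line_length : Int) : String :=
  let lines := pvGoB (pvPad20 seq1id.toList) (pvPad20 seq2id.toList) line_length
                 align1.toList align2.toList
  String.ofList (PySem.Chars.join ['\n'] (lines ++ [[]]))

-- ===== PRECONDITION & SPEC =====
-- Pre_ excludes exactly the inputs where A raises: line_length = 0 (range ValueError), and a
-- positive line_length with align2 shorter than align1 (IndexError in the match comprehension).
def Pre_format_alignment_custom (seq1id : String) (seq2id : String) (align1 : String) (align2 : String) (line_length : Int) : Prop :=
  line_length ≠ 0 ∧ (0 < line_length → align1.toList.length ≤ align2.toList.length)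
instance (seq1id : String) (seq2id : String) (align1 : String) (align2 : String) (line_length : Int) : Decidable (Pre_format_alignment_custom seq1id seq2id align1 align2 line_length) := by unfold Pre_format_alignment_custom; infer_instance

def pvWitness_format_alignment_custom : String × String × String × String × Int := ("seq1", "seq2", "AC-G", "AG-GT", 3)

def Spec_format_alignment_custom (seq1id : String) (seq2id : String) (align1 : String) (align2 : String) (line_length : Int) (out : String) : Prop := out = format_alignment_custom_alt seq1id seq2id align1 align2 line_length
instance (seq1id : String) (seq2id : String) (align1 : String) (align2 : String) (line_length : Int) (out : String) : Decidable (Spec_format_alignment_custom seq1id seq2id align1 align2 line_length out) := by unfold Spec_format_alignment_custom; infer_instance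

-- ===== CLAIM (what is proved, stated in full; the proofs are below) =====
def Claim_equal_format_alignment_custom : Prop := ∀ (seq1id : String) (seq2id : String) (align1 : String) (align2 : String) (line_length : Int), Dom_format_alignment_custom seq1id seq2id align1 align2 line_length → Pre_format_alignment_custom seq1id seq2id align1 align2 line_length → Spec_format_alignment_custom seq1id seq2id align1 align2 line_length (format_alignment_custom seq1id seq2id align1 align2 line_length)

-- ===== LEMMAS AND PROOFS =====

-- range(0, n, L) is empty for a negative step (n ≥ 0)
lemma pv_pyRange_neg_empty (n : Nat) (L : Int) (h : L < 0) : PySem.List.pyRange 0 (n : Int) L = [] := by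
  simp [PySem.List.pyRange, h.ne, not_lt.mpr h.le, show ¬((n : Int) < 0) from by omega]

-- on chunks where chunk2 is at least as long, A's indexed match line is B's zip match line
lemma pv_matchA_eq (c1 c2 : List Char) (h : c1.length ≤ c2.length) :
    pvMatchLineA c1 c2 = pvMatchZip c1 c2 := by
  unfold pvMatchLineA pvMatchZip
  rw [PySem.List.pyRange_zero_natCast, List.map_map]
  apply List.ext_getElem
  · simp; omega
  · intro k h1 h2
    simp only [List.getElem_map, List.getElem_range, Function.comp_apply, List.getElem_zip]
    have hk1 : k < c1.length := by simpa using h1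
    have hk2 : k < c2.length := lt_of_lt_of_le hk1 h
    rw [PySem.List.pyGetD_natCast, PySem.List.pyGetD_natCast,
        List.getD_eq_getElem c1 ' ' hk1, List.getD_eq_getElem c2 ' ' hk2]

-- B's match marks commute with take and drop
lemma pv_matchZip_take_drop (a1 a2 : List Char) (p q : Nat) :
    pvMatchZip ((a1.drop p).take q) ((a2.drop p).take q)
      = ((pvMatchZip a1 a2).drop p).take q := by
  simp [pvMatchZip, List.zip, ← List.take_zipWith, ← List.drop_zipWith, List.map_take, List.map_drop]

-- A's per-chunk match line is a slice of the whole-sequence match marks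
lemma pv_match_slice (a1 a2 : List Char) (h : a1.length ≤ a2.length) (i L : Int)
    (hi : 0 ≤ i) (hiL : 0 ≤ i + L) :
    pvMatchLineA (PySem.List.slice a1 (some i) (some (i + L)))
                 (PySem.List.slice a2 (some i) (some (i + L)))
      = PySem.List.slice (pvMatchZip a1 a2) (some i) (some (i + L)) := by
  rw [PySem.List.slice_toNat a1 hi hiL, PySem.List.slice_toNat a2 hi hiL,
      PySem.List.slice_toNat _ hi hiL]
  rw [pv_matchA_eq _ _ (by simp; omega)]
  exact pv_matchZip_take_drop a1 a2 i.toNat ((i + L).toNat - i.toNat)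

-- A's loop as flatten of a map, once the range indices are known nonnegative
lemma pv_loop_eq (n1 n2 : List Char) (a1 a2 : List Char) (L : Int)
    (h : a1.length ≤ a2.length) (hL : 0 < L) :
    ∀ (l : List Int), (∀ i ∈ l, 0 ≤ i) → ∀ (acc : List Char),
    l.foldl (fun acc i =>
        (((acc ++ (n1 ++ ' ' :: PySem.List.slice a1 (some i) (some (i + L)) ++ ['\n'])) ++
          (pvPad20 [] ++ ' ' :: pvMatchLineA (PySem.List.slice a1 (some i) (some (i + L)))
              (PySem.List.slice a2 (some i) (some (i + L))) ++ ['\n'])) ++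
          (n2 ++ ' ' :: PySem.List.slice a2 (some i) (some (i + L)) ++ ['\n'])) ++ ['\n']) acc
      = acc ++ (l.map (fun i =>
          n1 ++ ' ' :: PySem.List.slice a1 (some i) (some (i + L)) ++
          '\n' :: List.replicate 20 ' ' ++ ' ' :: PySem.List.slice (pvMatchZip a1 a2) (some i) (some (i + L)) ++
          '\n' :: n2 ++ ' ' :: PySem.List.slice a2 (some i) (some (i + L)) ++
          ['\n', '\n'])).flatten := by
  intro l
  induction l with
  | nil => intro _ acc; simp
  | cons i t ih =>
    intro hmem acc
    have hi : 0 ≤ i := hmem i (List.mem_cons_self)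
    rw [List.foldl_cons, ih (fun j hj => hmem j (List.mem_cons_of_mem i hj))]
    rw [List.map_cons, List.flatten_cons]
    rw [pv_match_slice a1 a2 h i L hi (by omega)]
    simp [pvPad20, List.append_assoc]

-- range(0, n, k) for positive k peels off its first index
lemma pv_pyRange_shift (n k : Int) (hk : 0 < k) (hn : 0 < n) :
    PySem.List.pyRange 0 n k = 0 :: (PySem.List.pyRange 0 (n - k) k).map (· + k) := by
  rw [PySem.List.pyRange_of_pos _ _ hk, PySem.List.pyRange_of_pos _ _ hk]
  have hdiv : (n - 0 + k - 1) / k = (n - 1) / k + 1 := by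
    rw [show n - 0 + k - 1 = (n - 1) + 1 * k by ring, Int.add_mul_ediv_right _ _ (ne_of_gt hk)]
  have hd0 : 0 ≤ (n - 1) / k := Int.ediv_nonneg (by omega) hk.le
  by_cases hnk : k < n
  · have : n - k - 0 + k - 1 = n - 1 := by ring
    rw [if_pos hn, if_pos (by omega : (0:Int) < n - k), this, hdiv,
        Int.toNat_add hd0 (by norm_num), Int.toNat_one, List.range_succ_eq_map]
    simp only [List.map_cons, List.map_map]
    refine congrArg₂ _ (by ring) (List.map_congr_left fun j _ => ?_)
    simp [Function.comp]; ring
  · have h1 : (n - 1) / k = 0 := Int.ediv_eq_zero_of_lt (by omega) (by omega)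
    rw [if_pos hn, if_neg (by omega : ¬ (0:Int) < n - k), hdiv, h1]
    simp
-- also needs the empty-range form at nonpositive stop
lemma pv_pyRange_nonpos (b k : Int) (hk : 0 < k) (hb : b ≤ 0) :
    PySem.List.pyRange 0 b k = [] := by
  rw [PySem.List.pyRange_of_pos _ _ hk, if_neg (by omega : ¬ (0:Int) < b)]
  simp

-- "\n".join with a leading empty line
lemma pv_join_nil_cons (t : List (List Char)) (h : t ≠ []) :
    PySem.Chars.join ['\n'] ([] :: t) = '\n' :: PySem.Chars.join ['\n'] t := by
  cases t with
  | nil => exact absurd rfl h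
  | cons a r => rw [PySem.Chars.join_cons_cons]; rfl

-- the flatten-of-blocks form of A's loop equals B's joined line list
lemma pv_go_eq (n1 n2 : List Char) (k : Nat) (hk : 0 < k) :
    ∀ (N : Nat) (a1 a2 : List Char), a1.length ≤ N → a1.length ≤ a2.length →
    ((PySem.List.pyRange 0 (a1.length : Int) (k : Int)).map (fun i =>
          n1 ++ ' ' :: PySem.List.slice a1 (some i) (some (i + (k:Int))) ++
          '\n' :: List.replicate 20 ' ' ++ ' ' :: PySem.List.slice (pvMatchZip a1 a2) (some i) (some (i + (k:Int))) ++
          '\n' :: n2 ++ ' ' :: PySem.List.slice a2 (some i) (some (i + (k:Int))) ++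
          ['\n', '\n'])).flatten
      = PySem.Chars.join ['\n'] (pvGoB n1 n2 (k:Int) a1 a2 ++ [[]]) := by
  intro N
  induction N with
  | zero =>
    intro a1 a2 h1 _
    have : a1 = [] := List.eq_nil_of_length_eq_zero (Nat.le_zero.mp h1)
    subst this
    rw [pvGoB, dif_pos (Or.inl rfl)]
    rw [show (([] : List Char).length : Int) = 0 from rfl,
        pv_pyRange_nonpos 0 _ (by exact_mod_cast hk) le_rfl]
    simp [PySem.Chars.join_singleton]
  | succ N ih =>
    intro a1 a2 h1 h12
    by_cases ha : a1 = []
    · subst ha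
      rw [pvGoB, dif_pos (Or.inl rfl)]
      rw [show (([] : List Char).length : Int) = 0 from rfl,
          pv_pyRange_nonpos 0 _ (by exact_mod_cast hk) le_rfl]
      simp [PySem.Chars.join_singleton]
    · have hlen : 0 < a1.length := List.length_pos_iff.mpr ha
      rw [pvGoB, dif_neg (by push_neg; exact ⟨ha, by omega⟩)]
      rw [pv_pyRange_shift _ _ (by exact_mod_cast hk) (by exact_mod_cast hlen)]
      rw [List.map_cons, List.flatten_cons, List.map_map]
      -- the tail of the range maps onto the dropped sequences
      have htail :
          ((PySem.List.pyRange 0 ((a1.length : Int) - k) (k:Int)).map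
            ((fun i =>
              n1 ++ ' ' :: PySem.List.slice a1 (some i) (some (i + (k:Int))) ++
              '\n' :: List.replicate 20 ' ' ++ ' ' :: PySem.List.slice (pvMatchZip a1 a2) (some i) (some (i + (k:Int))) ++
              '\n' :: n2 ++ ' ' :: PySem.List.slice a2 (some i) (some (i + (k:Int))) ++
              ['\n', '\n'])  ∘ (· + (k:Int)))).flatten
          = PySem.Chars.join ['\n'] (pvGoB n1 n2 (k:Int) (a1.drop k) (a2.drop k) ++ [[]]) := by
        have hcast : ((a1.drop k).length : Int) = (a1.length : Int) - k ∨ (a1.drop k).length = 0 ∧ (a1.length:Int) - k ≤ 0 := by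
          simp only [List.length_drop]; omega
        have hstop : PySem.List.pyRange 0 ((a1.length : Int) - k) (k:Int)
            = PySem.List.pyRange 0 (((a1.drop k).length : Int)) (k:Int) := by
          have hkZ : (0:Int) < (k:Int) := by exact_mod_cast hk
          rcases hcast with h | ⟨h0, hle⟩
          · rw [h]
          · rw [h0, Nat.cast_zero, pv_pyRange_nonpos _ _ hkZ hle,
                pv_pyRange_nonpos _ _ hkZ le_rfl]
        rw [hstop, ← ih (a1.drop k) (a2.drop k) (by simp [List.length_drop]; omega)
              (by simp only [List.length_drop]; omega)]
        refine congrArg _ (List.map_congr_left fun j hj => ?_)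
        have hj0 : 0 ≤ j := ((PySem.List.mem_pyRange_iff_of_pos (by exact_mod_cast hk) j).mp hj).1
        simp only [Function.comp_apply]
        obtain ⟨jn, rfl⟩ : ∃ jn : Nat, j = (jn : Int) := ⟨j.toNat, (Int.toNat_of_nonneg hj0).symm⟩
        have hs : ∀ (xs : List Char),
            PySem.List.slice xs (some ((jn:Int) + (k:Int))) (some ((jn:Int) + (k:Int) + (k:Int)))
              = PySem.List.slice (xs.drop k) (some (jn:Int)) (some ((jn:Int) + (k:Int))) := by
          intro xs
          rw [show (jn:Int) + (k:Int) = ((jn + k : Nat) : Int) by push_cast; ring,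
              show ((jn + k : Nat):Int) + (k:Int) = ((jn + k + k : Nat) : Int) by push_cast; ring,
              PySem.List.slice_natCast, PySem.List.slice_natCast, List.drop_drop]
          congr 1
          · omega
          · congr 1; omega
        have hm : pvMatchZip (a1.drop k) (a2.drop k) = (pvMatchZip a1 a2).drop k := by
          simp [pvMatchZip, List.zip, ← List.drop_zipWith, List.map_drop]
        rw [hs a1, hs a2, hs (pvMatchZip a1 a2), hm]
      rw [htail]
      -- head block: index 0 gives the prefix chunks
      have hhead : ∀ (xs : List Char),
          PySem.List.slice xs (some (0:Int)) (some ((0:Int) + (k:Int))) = xs.take k := by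
        intro xs
        rw [PySem.List.slice_toNat _ le_rfl (by omega)]
        simp
      have hsliceto : ∀ (xs : List Char), PySem.List.slice xs none (some ((k:Nat) : Int)) = xs.take k :=
        fun xs => PySem.List.slice_to_natCast xs k
      have hmz : pvMatchZip (a1.take k) (a2.take k) = (pvMatchZip a1 a2).take k := by
        have := pv_matchZip_take_drop a1 a2 0 k
        simpa using this
      have hslicefrom : ∀ (xs : List Char), PySem.List.slice xs (some ((k:Nat):Int)) none = xs.drop k :=
        fun xs => PySem.List.slice_from_natCast xs k
      rw [hhead a1, hhead a2, hhead (pvMatchZip a1 a2), hsliceto a1, hsliceto a2,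
          hslicefrom a1, hslicefrom a2, hmz]
      -- expand the join of the four new lines
      have hne : pvGoB n1 n2 (k:Int) (a1.drop k) (a2.drop k) ++ [[]] ≠ [] := by simp
      rw [List.cons_append, List.cons_append, List.cons_append, List.cons_append,
          PySem.Chars.join_cons_cons, PySem.Chars.join_cons_cons, PySem.Chars.join_cons_cons,
          pv_join_nil_cons _ hne]
      simp [List.append_assoc]

-- ===== VERDICT (by name: the statement is the Claim_ definition above) =====
theorem format_alignment_custom_spec : Claim_equal_format_alignment_custom := by
  intro seq1id seq2id align1 align2 L _hdom hpre
  obtain ⟨hL0, hle⟩ := hpre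
  unfold Spec_format_alignment_custom
  simp only [format_alignment_custom, format_alignment_custom_alt]
  rcases lt_or_gt_of_ne hL0 with hneg | hpos
  · rw [pv_pyRange_neg_empty _ _ hneg, pvGoB, dif_pos (Or.inr hneg.le),
        List.nil_append, PySem.Chars.join_singleton]
    rfl
  · obtain ⟨k, rfl⟩ : ∃ k : Nat, L = (k : Int) := ⟨L.toNat, (Int.toNat_of_nonneg hpos.le).symm⟩
    have hk : 0 < k := by exact_mod_cast hpos
    have hloop := pv_loop_eq (pvPad20 seq1id.toList) (pvPad20 seq2id.toList)
      align1.toList align2.toList (k:Int) (hle hpos) hpos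
      (PySem.List.pyRange 0 (align1.toList.length : Int) (k:Int))
      (fun i hi => ((PySem.List.mem_pyRange_iff_of_pos hpos i).mp hi).1) []
    simp only [] at hloop ⊢
    rw [hloop, List.nil_append]
    rw [pv_go_eq (pvPad20 seq1id.toList) (pvPad20 seq2id.toList) k hk
      align1.toList.length align1.toList align2.toList le_rfl (hle hpos)]
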